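-- pv_equiv track=rewrite | github.com/dycalo/empathy | empathy/agents/feedback.py | _select_relevant
-- ===== SOURCE A (Python) =====
-- def _select_relevant(
--     history: list[dict], instruction: str, max_examples: int
-- ) -> list[dict]:
--     """Select examples relevant to current instruction.
--
--     Simple keyword matching for now.
--     """
--     # Extract keywords from instruction
--     keywords = set(instruction.lower().split())
--
--     # Score examples by keyword overlap
--     scored = []
--     for draft in history:
--         draft_instruction = draft.get("instruction", "").lower()
--         draft_keywords = set(draft_instruction.split())
--         overlap = len(keywords & draft_keywords)
--         scored.append((overlap, draft))
--
--     # Sort by score (descending) and take top examples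
--     scored.sort(key=lambda x: x[0], reverse=True)
--     return [draft for _, draft in scored[:max_examples]]
-- ===== SOURCE B (Python) =====
-- def _select_relevant(
--     history: list[dict], instruction: str, max_examples: int
-- ) -> list[dict]:
--     """Select examples relevant to current instruction (bucket version)."""
--     keywords = set(instruction.lower().split())
--
--     # Bucket examples by overlap score, keeping history order inside a bucket
--     buckets: dict[int, list] = {}
--     for draft in history:
--         draft_keywords = set(draft.get("instruction", "").lower().split())
--         overlap = len(keywords & draft_keywords)
--         buckets.setdefault(overlap, []).append(draft)
--
--     # Walk scores from the maximum possible down to 0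
--     result = []
--     for s in range(len(keywords), -1, -1):
--         result.extend(buckets.get(s, []))
--     return result[:max_examples]
-- ===== Notes on version B (the rewrite author's own statement) =====
-- stated objective: alternative
-- what changed: Replaces the stable descending sort of (score, example) pairs by a dict bucketing examples per overlap score and walking scores from len(keywords) down to 0, preserving tie order and the final slice.
import Mathlib
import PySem

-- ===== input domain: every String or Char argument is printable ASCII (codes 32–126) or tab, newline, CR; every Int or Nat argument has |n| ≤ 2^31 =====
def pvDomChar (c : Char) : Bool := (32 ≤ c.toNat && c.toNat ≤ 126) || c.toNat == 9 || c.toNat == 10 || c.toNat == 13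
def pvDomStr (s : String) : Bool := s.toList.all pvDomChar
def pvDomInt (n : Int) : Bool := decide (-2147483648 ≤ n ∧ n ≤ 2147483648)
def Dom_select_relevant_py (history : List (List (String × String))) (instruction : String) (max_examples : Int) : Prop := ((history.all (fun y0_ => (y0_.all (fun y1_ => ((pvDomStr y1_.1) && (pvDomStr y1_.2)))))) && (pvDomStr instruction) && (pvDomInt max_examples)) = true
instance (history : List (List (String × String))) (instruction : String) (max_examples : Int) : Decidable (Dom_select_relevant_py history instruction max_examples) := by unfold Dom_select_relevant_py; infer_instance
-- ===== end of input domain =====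

-- B replaces A's stable reverse sort by score-buckets (dict score -> examples, walked from the
-- maximal score down), an alternative decomposition with the same output order. A = B everywhere.

-- ===== PORT A =====
def select_relevant_py (history : List (List (String × String))) (instruction : String) (max_examples : Int) : List (List (String × String)) :=
  let keywords : PySem.Set String := PySem.Set.ofList (PySem.Str.split₀ (PySem.Str.lower instruction))
  -- scored.append((overlap, draft)) loop
  let scored : List (Int × List (String × String)) :=
    history.foldl (fun acc draft =>
      let draft_instruction := PySem.Str.lower ((PySem.Dict.mk draft).getD "instruction" "")
      let draft_keywords : PySem.Set String := PySem.Set.ofList (PySem.Str.split₀ draft_instruction)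
      let overlap : Int := ((PySem.Set.inter keywords draft_keywords).length : Int)
      acc ++ [(overlap, draft)]) []
  -- scored.sort(key=lambda x: x[0], reverse=True); return [draft for _, draft in scored[:max_examples]]
  let sortedScored := PySem.List.sorted scored (fun x => x.1) true
  (PySem.List.slice sortedScored none (some max_examples)).map (fun p => p.2)

-- ===== PORT B =====
def select_relevant_py_alt (history : List (List (String × String))) (instruction : String) (max_examples : Int) : List (List (String × String)) :=
  let keywords : PySem.Set String := PySem.Set.ofList (PySem.Str.split₀ (PySem.Str.lower instruction))
  -- buckets.setdefault(overlap, []).append(draft) loop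
  let buckets : PySem.Dict Int (List (List (String × String))) :=
    history.foldl (fun d draft =>
      let draft_keywords : PySem.Set String :=
        PySem.Set.ofList (PySem.Str.split₀ (PySem.Str.lower ((PySem.Dict.mk draft).getD "instruction" "")))
      let overlap : Int := ((PySem.Set.inter keywords draft_keywords).length : Int)
      d.modify overlap [] (· ++ [draft])) PySem.Dict.empty
  -- for s in range(len(keywords), -1, -1): result.extend(buckets.get(s, []))
  let result := (PySem.List.pyRange (keywords.length : Int) (-1) (-1)).foldl
      (fun acc s => acc ++ buckets.getD s []) []
  PySem.List.slice result none (some max_examples)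

-- ===== PRECONDITION & SPEC =====
def Spec_select_relevant_py (history : List (List (String × String))) (instruction : String) (max_examples : Int) (out : List (List (String × String))) : Prop := out = select_relevant_py_alt history instruction max_examples
instance (history : List (List (String × String))) (instruction : String) (max_examples : Int) (out : List (List (String × String))) : Decidable (Spec_select_relevant_py history instruction max_examples out) := by unfold Spec_select_relevant_py; infer_instance

-- ===== CLAIM (what is proved, stated in full; the proofs are below) =====
def Claim_equal_select_relevant_py : Prop := ∀ (history : List (List (String × String))) (instruction : String) (max_examples : Int), Dom_select_relevant_py history instruction max_examples → Spec_select_relevant_py history instruction max_examples (select_relevant_py history instruction max_examples)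

-- ===== LEMMAS AND PROOFS =====

-- insertBy skips a prefix it is not 'before'
lemma insertBy_append_not_before {α : Type} (bf : α → α → Bool) (x : α) (l1 l2 : List α)
    (h1 : ∀ y ∈ l1, bf x y = false) :
    PySem.List.insertBy bf x (l1 ++ l2) = l1 ++ PySem.List.insertBy bf x l2 := by
  induction l1 with
  | nil => simp
  | cons a t ih =>
    simp only [List.cons_append, PySem.List.insertBy, h1 a (by simp)]
    simp only [Bool.false_eq_true, if_false, List.cons.injEq, true_and]
    exact ih (fun y hy => h1 y (by simp [hy]))

-- insertBy lands exactly between a not-before prefix and a before suffix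
lemma insertBy_split {α : Type} (bf : α → α → Bool) (x : α) (l1 l2 : List α)
    (h1 : ∀ y ∈ l1, bf x y = false) (h2 : ∀ y ∈ l2, bf x y = true) :
    PySem.List.insertBy bf x (l1 ++ l2) = l1 ++ x :: l2 := by
  rw [insertBy_append_not_before bf x l1 l2 h1]
  cases l2 with
  | nil => simp [PySem.List.insertBy]
  | cons b t => simp [PySem.List.insertBy, h2 b (by simp)]

-- inserting one element into the bucket concatenation appends it to its own bucket
lemma insert_buckets {α : Type} (x : Int × α) (S : List Int) (l : List (Int × α))
    (hS : S.Pairwise (· > ·)) (hx : x.1 ∈ S) :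
    PySem.List.insertBy (fun a b => decide (b.1 < a.1)) x
      (S.flatMap (fun s => l.filter (fun p => p.1 == s)))
    = S.flatMap (fun s => (l ++ [x]).filter (fun p => p.1 == s)) := by
  induction S with
  | nil => cases hx
  | cons s S' ih =>
    have hpair := List.pairwise_cons.mp hS
    simp only [List.flatMap_cons]
    by_cases hxs : x.1 = s
    · -- x belongs to the head bucket: it goes right after it
      have hrest : ∀ y ∈ S'.flatMap (fun s => l.filter (fun p => p.1 == s)),
          (fun a b : Int × α => decide (b.1 < a.1)) x y = true := by
        intro y hy
        rcases List.mem_flatMap.mp hy with ⟨s', hs', hyf⟩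
        have : y.1 = s' := by simpa using (List.mem_filter.mp hyf).2
        simp only [decide_eq_true_iff, this, hxs]
        exact hpair.1 s' hs'
      have hpre : ∀ y ∈ l.filter (fun p => p.1 == s),
          (fun a b : Int × α => decide (b.1 < a.1)) x y = false := by
        intro y hy
        have : y.1 = s := by simpa using (List.mem_filter.mp hy).2
        simp [this, hxs]
      rw [insertBy_split _ x _ _ hpre hrest]
      have htail : S'.flatMap (fun s => (l ++ [x]).filter (fun p => p.1 == s))
          = S'.flatMap (fun s => l.filter (fun p => p.1 == s)) := by
        refine List.flatMap_congr (fun s' hs' => ?_)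
        have hne : ¬ (x.1 == s') = true := by
          simp only [beq_iff_eq, hxs]
          exact fun h => absurd (hpair.1 s' hs') (by omega)
        simp [List.filter_append, hne]
      rw [htail, List.filter_append]
      simp [hxs]
    · -- x belongs to a later bucket: skip the head bucket and recurse
      have hpre : ∀ y ∈ l.filter (fun p => p.1 == s),
          (fun a b : Int × α => decide (b.1 < a.1)) x y = false := by
        intro y hy
        have hy1 : y.1 = s := by simpa using (List.mem_filter.mp hy).2
        have hx' : x.1 ∈ S' := (List.mem_cons.mp hx).resolve_left hxs
        have : x.1 < s := hpair.1 _ hx'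
        simp [hy1]; omega
      rw [insertBy_append_not_before _ x _ _ hpre]
      have hx' : x.1 ∈ S' := (List.mem_cons.mp hx).resolve_left hxs
      rw [ih hpair.2 hx']
      have : (l ++ [x]).filter (fun p => p.1 == s) = l.filter (fun p => p.1 == s) := by
        simp [List.filter_append, show ¬ (x.1 == s) = true by simp [hxs]]
      rw [this]

-- stable descending sort IS the concatenation of buckets walked in strictly decreasing score order
lemma sorted_rev_eq_buckets {α : Type} (xs : List (Int × α)) (S : List Int)
    (hS : S.Pairwise (· > ·)) (hcov : ∀ p ∈ xs, p.1 ∈ S) :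
    PySem.List.sorted xs (fun p => p.1) true
      = S.flatMap (fun s => xs.filter (fun p => p.1 == s)) := by
  induction xs using List.reverseRecOn with
  | nil => simp [PySem.List.sorted_rev_eq_foldl_insertBy]
  | append_singleton l x ih =>
    rw [PySem.List.sorted_rev_eq_foldl_insertBy, List.foldl_append, List.foldl_cons, List.foldl_nil,
        ← PySem.List.sorted_rev_eq_foldl_insertBy, ih (fun p hp => hcov p (by simp [hp]))]
    exact insert_buckets x S l hS (hcov x (by simp))

-- map commutes with the slice xs[:b]
lemma map_slice_to {α β : Type} (f : α → β) (xs : List α) (b : Int) :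
    (PySem.List.slice xs none (some b)).map f = PySem.List.slice (xs.map f) none (some b) := by
  simp [PySem.List.slice, PySem.List.clampIdx]

-- the countdown range(K, -1, -1) is strictly decreasing
lemma pairwise_gt_countdown (K : Int) :
    (PySem.List.pyRange K (-1) (-1)).Pairwise (· > ·) := by
  rw [PySem.List.pyRange_neg_one_eq_reverse]
  exact List.pairwise_reverse.mpr (PySem.List.pairwise_lt_pyRange_one _ _)

lemma length_inter_le {α : Type} [BEq α] (s t : PySem.Set α) :
    (PySem.Set.inter s t).length ≤ s.length :=
  List.length_filter_le _ _

set_option maxHeartbeats 1000000 in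
theorem select_relevant_py_spec_aux (history : List (List (String × String))) (instruction : String) (max_examples : Int) :
    select_relevant_py history instruction max_examples = select_relevant_py_alt history instruction max_examples := by
  unfold select_relevant_py select_relevant_py_alt
  dsimp only
  set kw : PySem.Set String := PySem.Set.ofList (PySem.Str.split₀ (PySem.Str.lower instruction)) with hkw
  set ov : List (String × String) → Int := fun draft =>
    ((PySem.Set.inter kw (PySem.Set.ofList (PySem.Str.split₀ (PySem.Str.lower
        ((PySem.Dict.mk draft).getD "instruction" ""))))).length : Int) with hov
  -- A's scored list is a map of history; B folds the same decorated list into the bucket dict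
  have hfold : history.foldl (fun d draft => d.modify (ov draft) [] (· ++ [draft])) PySem.Dict.empty
      = (history.map (fun draft => (ov draft, draft))).foldl
          (fun d p => d.modify p.1 [] (· ++ [p.2])) PySem.Dict.empty := by
    rw [List.foldl_map]
  rw [PySem.List.foldl_append_singleton_eq_map (f := fun draft => (ov draft, draft)),
      List.nil_append, hfold]
  set scored := history.map (fun draft => (ov draft, draft)) with hscored
  set S := PySem.List.pyRange (kw.length : Int) (-1) (-1) with hS
  have hbuck : ∀ s : Int,
      (scored.foldl (fun d p => d.modify p.1 [] (· ++ [p.2])) PySem.Dict.empty).getD s []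
        = (scored.filter (fun p => p.1 == s)).map (fun p => p.2) := by
    intro s
    rw [PySem.Dict.getD_foldl_modify_append]
    simp
  have hcov : ∀ p ∈ scored, p.1 ∈ S := by
    intro p hp
    rcases List.mem_map.mp hp with ⟨draft, _, rfl⟩
    show ov draft ∈ S
    rw [hS, PySem.List.mem_pyRange_neg_one, hov]
    refine ⟨lt_of_lt_of_le neg_one_lt_zero (Int.natCast_nonneg _), ?_⟩
    dsimp only
    exact_mod_cast length_inter_le kw _
  rw [PySem.List.foldl_append_eq_flatMap, List.nil_append,
      List.flatMap_congr (fun s _ => hbuck s),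
      sorted_rev_eq_buckets scored S (pairwise_gt_countdown _) hcov,
      map_slice_to, List.map_flatMap]

-- ===== VERDICT (by name: the statement is the Claim_ definition above) =====
theorem select_relevant_py_spec : Claim_equal_select_relevant_py := by
  intro history instruction max_examples _
  exact select_relevant_py_spec_aux history instruction max_examples
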